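-- pv_equiv track=rewrite | github.com/howonkim3667-cell/Algorithm | 프로그래머스/0/120815. 피자 나눠 먹기 （2）/피자 나눠 먹기 （2）.py | solution
-- ===== SOURCE A (Python) =====
-- def solution(n):
--     piece = 6
--     count =1
--     while True:
--         if piece%n==0:
--             return count
--         count +=1
--         piece += 6
-- ===== SOURCE B (Python) =====
-- def solution(n):
--     m = -n if n < 0 else n
--     a, b = 6, m
--     while b:
--         a, b = b, a % b
--     return m // a
-- ===== Notes on version B (the rewrite author's own statement) =====
-- stated objective: faster
-- what changed: Replaces A's linear trial loop over multiples of 6 with a closed form |n| // gcd(6, |n|) computed by the Euclidean algorithm.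
import Mathlib
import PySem

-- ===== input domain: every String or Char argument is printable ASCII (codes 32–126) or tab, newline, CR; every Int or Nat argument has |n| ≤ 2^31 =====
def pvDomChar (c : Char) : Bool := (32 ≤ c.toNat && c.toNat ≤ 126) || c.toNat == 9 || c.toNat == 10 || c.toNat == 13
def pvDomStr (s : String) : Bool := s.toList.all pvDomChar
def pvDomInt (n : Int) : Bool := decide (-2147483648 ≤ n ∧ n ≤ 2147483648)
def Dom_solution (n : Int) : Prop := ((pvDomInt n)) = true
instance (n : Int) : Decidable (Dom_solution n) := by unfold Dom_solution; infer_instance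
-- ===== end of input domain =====

-- B replaces A's linear scan over multiples of 6 with the closed form |n| // gcd(6,|n|)
-- computed by the Euclidean algorithm (objective: faster).


-- ===== PORT A =====
-- the 'while True' loop: terminates at count = |n| at the latest, so fuel |n| is enough
def solutionLoop (n : Int) (count piece : Int) (fuel : Nat) : Int :=
  match fuel with
  | 0 => 0
  | f + 1 =>
    if PySem.Int.mod piece n = 0 then count
    else solutionLoop n (count + 1) (piece + 6) f

def solution (n : Int) : Int := solutionLoop n 1 6 n.natAbs

-- ===== PORT B =====
-- 'while b: a, b = b, a % b' — b strictly decreases, fuel m+1 suffices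
def euclidLoop (a b : Int) (fuel : Nat) : Int :=
  match fuel with
  | 0 => a
  | f + 1 =>
    if b = 0 then a else euclidLoop b (PySem.Int.mod a b) f

def solution_alt (n : Int) : Int :=
  let m : Int := if n < 0 then -n else n
  PySem.Int.floordiv m (euclidLoop 6 m (m.toNat + 1))

-- ===== PRECONDITION & SPEC =====
-- Pre_ excludes n = 0, on which A raises ZeroDivisionError
def Pre_solution (n : Int) : Prop := n ≠ 0
instance (n : Int) : Decidable (Pre_solution n) := by unfold Pre_solution; infer_instance
def pvWitness_solution : Int := 4

def Spec_solution (n : Int) (out : Int) : Prop := out = solution_alt n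
instance (n : Int) (out : Int) : Decidable (Spec_solution n out) := by unfold Spec_solution; infer_instance

-- ===== CLAIM (what is proved, stated in full; the proofs are below) =====
def Claim_equal_solution : Prop := ∀ (n : Int), Dom_solution n → Pre_solution n → Spec_solution n (solution n)

-- ===== LEMMAS AND PROOFS =====

-- B's Euclid loop computes Nat.gcd (on nonnegative inputs, with enough fuel)
lemma euclidLoop_eq_gcd (fuel : Nat) : ∀ (a b : Int), 0 ≤ a → 0 ≤ b → b.toNat < fuel →
    euclidLoop a b fuel = (Nat.gcd a.toNat b.toNat : Int) := by
  induction fuel with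
  | zero => intro a b _ _ h; omega
  | succ f ih =>
    intro a b ha hb hf
    simp only [euclidLoop]
    by_cases h0 : b = 0
    · simp [h0, Int.toNat_of_nonneg ha]
    · rw [if_neg h0]
      have hbpos : 0 < b := lt_of_le_of_ne hb (Ne.symm h0)
      have hmod : PySem.Int.mod a b = ((a.toNat % b.toNat : Nat) : Int) := by
        conv_lhs => rw [← Int.toNat_of_nonneg ha, ← Int.toNat_of_nonneg hb]
        rw [PySem.Int.mod_natCast]
      have hlt : a.toNat % b.toNat < b.toNat := Nat.mod_lt _ (by omega)
      rw [hmod, ih b ((a.toNat % b.toNat : Nat) : Int) hb (by positivity)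
        (by simp only [Int.toNat_natCast]; omega)]
      simp only [Int.toNat_natCast]
      rw [Nat.gcd_comm a.toNat b.toNat, Nat.gcd_rec b.toNat a.toNat, Nat.gcd_comm]

-- A's loop returns t when t is the least count ≥ the current one whose 6·count n divides
lemma solutionLoop_eq (n : Int) (t : Int) :
    ∀ (fuel : Nat) (c : Int), c ≤ t → t < c + fuel → n ∣ 6 * t →
    (∀ k : Int, c ≤ k → k < t → ¬ n ∣ 6 * k) →
    solutionLoop n c (6 * c) fuel = t := by
  intro fuel
  induction fuel with
  | zero => intro c h1 h2 _ _; omega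
  | succ f ih =>
    intro c h1 h2 hdiv hmin
    simp only [solutionLoop]
    by_cases hc : n ∣ 6 * c
    · rw [if_pos ((PySem.Int.mod_eq_zero_iff_dvd _ _).mpr hc)]
      by_contra hne
      exact hmin c le_rfl (lt_of_le_of_ne h1 hne) hc
    · rw [if_neg (fun h => hc ((PySem.Int.mod_eq_zero_iff_dvd _ _).mp h))]
      have hct : c < t := lt_of_le_of_ne h1 (by rintro rfl; exact hc hdiv)
      have h6 : 6 * c + 6 = 6 * (c + 1) := by ring
      rw [h6]
      exact ih (c + 1) (by omega) (by push_cast at h2 ⊢; omega) hdiv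
        (fun k hk1 hk2 => hmin k (by omega) hk2)

-- ===== VERDICT =====
theorem solution_spec : Claim_equal_solution := by
  intro n _ hn
  unfold Spec_solution solution solution_alt
  set m : Nat := n.natAbs with hm
  have hmpos : 0 < m := Int.natAbs_pos.mpr hn
  have hmint : (if n < 0 then -n else n) = (m : Int) := by
    simp only [hm]; split_ifs with h <;> omega
  simp only [hmint]
  rw [euclidLoop_eq_gcd ((m : Int).toNat + 1) 6 (m : Int) (by norm_num) (by positivity)
    (by omega)]
  simp only [Int.toNat_natCast]
  have h6n : (6 : Int).toNat = 6 := rfl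
  rw [h6n]
  set g : Nat := Nat.gcd 6 m with hg
  have hgpos : 0 < g := Nat.gcd_pos_of_pos_right _ hmpos
  have hgm : g ∣ m := Nat.gcd_dvd_right _ _
  have hg6 : g ∣ 6 := Nat.gcd_dvd_left _ _
  set t : Nat := m / g with ht
  rw [show PySem.Int.floordiv (m : Int) (g : Int) = (t : Int) from
    by exact_mod_cast PySem.Int.floordiv_natCast m g]
  have htpos : 0 < t := Nat.div_pos (Nat.le_of_dvd hmpos hgm) hgpos
  have htm : t ≤ m := Nat.div_le_self _ _
  have hdvd_iff : ∀ k : Nat, (n ∣ 6 * (k : Int)) ↔ m ∣ 6 * k := by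
    intro k
    rw [← Int.natAbs_dvd, ← hm]
    constructor
    · intro h; exact_mod_cast h
    · intro h; exact_mod_cast h
  have e3 : 6 * t = (6 / g) * m := by
    rw [ht, ← Nat.mul_div_assoc 6 hgm, Nat.mul_comm 6 m, Nat.mul_div_assoc m hg6,
      Nat.mul_comm]
  have hdiv : n ∣ 6 * (t : Int) := by
    rw [hdvd_iff, e3]; exact dvd_mul_left m (6 / g)
  have hmin : ∀ k : Int, 1 ≤ k → k < (t : Int) → ¬ n ∣ 6 * k := by
    intro k hk1 hk2 hdk
    have hknat : k = ((k.toNat : Nat) : Int) := by omega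
    rw [hknat] at hdk hk2
    have hmk : m ∣ 6 * k.toNat := (hdvd_iff _).mp hdk
    have e1 : g * (m / g) = m := Nat.mul_div_cancel' hgm
    have e2 : g * ((6 / g) * k.toNat) = 6 * k.toNat := by
      rw [← Nat.mul_assoc, Nat.mul_div_cancel' hg6]
    have h1 : m / g ∣ (6 / g) * k.toNat :=
      (Nat.mul_dvd_mul_iff_left hgpos).mp (by rw [e1, e2]; exact hmk)
    have hcop : Nat.Coprime (m / g) (6 / g) :=
      (Nat.coprime_div_gcd_div_gcd (m := 6) (n := m) hgpos).symm
    have h2 : m / g ∣ k.toNat :=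
      hcop.dvd_of_dvd_mul_left (Nat.mul_comm (6 / g) k.toNat ▸ h1)
    have := Nat.le_of_dvd (by omega) h2
    omega
  have hloop := solutionLoop_eq n (t : Int) m 1 (by exact_mod_cast htpos)
    (by omega) hdiv (fun k hk1 hk2 => hmin k hk1 hk2)
  rw [show (6 : Int) = 6 * 1 from by ring]
  exact hloop
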